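-- pv_equiv track=rewrite | github.com/7marcosfelipe-gif/Kanvas | organize-dag.py | adjacent_layer_crossings
-- ===== SOURCE A (Python) =====
-- def adjacent_layer_crossings(left_layer, right_layer, children):
--     if not left_layer or not right_layer:
--         return 0
--
--     right_positions = {node_id: index for index, node_id in enumerate(right_layer)}
--     edges = []
--     for left_index, left_node in enumerate(left_layer):
--         for right_node in children.get(left_node, ()):
--             if right_node in right_positions:
--                 edges.append((left_index, right_positions[right_node]))
--
--     crossings = 0
--     for index, (left_a, right_a) in enumerate(edges):
--         for left_b, right_b in edges[index + 1:]:
--             if (left_a < left_b and right_a > right_b) or (left_a > left_b and right_a < right_b):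
--                 crossings += 1
--     return crossings
-- ===== SOURCE B (Python) =====
-- def _sort_count(a):
--     # merge sort returning (sorted list, number of strict inversions)
--     n = len(a)
--     if n <= 1:
--         return a, 0
--     mid = n // 2
--     left, c1 = _sort_count(a[:mid])
--     right, c2 = _sort_count(a[mid:])
--     merged = []
--     cross = 0
--     i = j = 0
--     while i < len(left) and j < len(right):
--         if left[i] <= right[j]:
--             merged.append(left[i])
--             i += 1
--         else:
--             cross += len(left) - i
--             merged.append(right[j])
--             j += 1
--     merged.extend(left[i:])
--     merged.extend(right[j:])
--     return merged, c1 + c2 + cross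
--
--
-- def adjacent_layer_crossings(left_layer, right_layer, children):
--     right_positions = {node_id: index for index, node_id in enumerate(right_layer)}
--     # Concatenate, per left node in order, its valid child positions sorted
--     # ascending: pairs under the same left node then never count, and the
--     # crossings are exactly the strict inversions of this sequence.
--     seq = []
--     for left_node in left_layer:
--         seq.extend(sorted(right_positions[c]
--                           for c in children.get(left_node, ())
--                           if c in right_positions))
--     return _sort_count(seq)[1]
-- ===== Notes on version B (the rewrite author's own statement) =====
-- stated objective: faster
-- what changed: Replaces A's O(E^2) all-pairs scan over the edge list by concatenating, per left node in order, its child positions sorted ascending and counting the strict inversions of that sequence with a merge sort (same-left-node pairs never cross, so the inversion count is exactly A's crossing count).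
import Mathlib
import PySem

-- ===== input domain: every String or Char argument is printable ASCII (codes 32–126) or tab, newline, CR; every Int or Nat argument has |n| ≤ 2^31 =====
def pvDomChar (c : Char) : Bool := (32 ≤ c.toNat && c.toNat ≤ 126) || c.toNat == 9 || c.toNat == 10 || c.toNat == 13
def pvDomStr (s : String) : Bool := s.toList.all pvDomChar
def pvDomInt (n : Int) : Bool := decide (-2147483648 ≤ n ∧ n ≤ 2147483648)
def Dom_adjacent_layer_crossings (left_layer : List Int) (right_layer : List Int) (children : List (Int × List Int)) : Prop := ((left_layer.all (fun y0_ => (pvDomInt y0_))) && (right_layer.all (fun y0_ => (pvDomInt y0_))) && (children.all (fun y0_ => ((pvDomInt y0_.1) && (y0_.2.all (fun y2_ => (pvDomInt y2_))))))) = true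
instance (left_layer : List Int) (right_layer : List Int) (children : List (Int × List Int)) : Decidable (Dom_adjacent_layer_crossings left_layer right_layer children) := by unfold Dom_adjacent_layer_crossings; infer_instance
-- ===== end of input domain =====

-- B replaces A's O(E^2) pair loop by concatenating, per left node, its child
-- positions in ascending order and counting inversions with a merge sort (asymptotically faster).

-- ===== PORT A =====
-- the crossing condition of A's innermost 'if'
def pvCondA (a b : Int × Int) : Bool :=
  (decide (a.1 < b.1) && decide (b.2 < a.2)) || (decide (b.1 < a.1) && decide (a.2 < b.2))

-- 'for index, (la, ra) in enumerate(edges): for (lb, rb) in edges[index+1:]: …':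
-- structural recursion over the edge list; each step scans the remaining suffix.
def pvPairLoopA : List (Int × Int) → Int
  | [] => 0
  | e :: es => es.foldl (fun acc b => if pvCondA e b then acc + 1 else acc) 0 + pvPairLoopA es

def adjacent_layer_crossings (left_layer : List Int) (right_layer : List Int) (children : List (Int × List Int)) : Int :=
  if left_layer.isEmpty || right_layer.isEmpty then 0
  else
    -- right_positions = {node_id: index for index, node_id in enumerate(right_layer)}
    let right_positions : PySem.Dict Int Int :=
      (PySem.List.enumerate right_layer).foldl (fun d p => d.insert p.2 p.1) PySem.Dict.empty
    -- membership test + lookup ported as one 'match' on get? (exact: 'in' then '[]')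
    let edges : List (Int × Int) :=
      (PySem.List.enumerate left_layer).foldl
        (fun acc p =>
          ((PySem.Dict.mk children).getD p.2 []).foldl
            (fun acc2 rn =>
              match right_positions.get? rn with
              | some pos => acc2 ++ [(p.1, pos)]
              | none => acc2) acc) []
    pvPairLoopA edges

-- ===== PORT B =====
-- the merge step of Source B's _sort_count: while-loop with two indices ported as
-- recursion on the two remaining suffixes; 'cross += len(left) - i' is the
-- + length of the remaining left suffix.
def pvMergeCount : List Int → List Int → List Int × Int
  | [], ys => (ys, 0)
  | x :: xs, [] => (x :: xs, 0)
  | x :: xs, y :: ys =>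
    if x ≤ y then
      let r := pvMergeCount xs (y :: ys)
      (x :: r.1, r.2)
    else
      let r := pvMergeCount (x :: xs) ys
      (y :: r.1, r.2 + ((x :: xs).length : Int))

-- Source B's _sort_count: merge sort returning (sorted list, strict inversion count)
def pvSortCount (a : List Int) : List Int × Int :=
  if a.length ≤ 1 then (a, 0)
  else
    let mid := a.length / 2
    let l := pvSortCount (a.take mid)
    let r := pvSortCount (a.drop mid)
    let m := pvMergeCount l.1 r.1
    (m.1, l.2 + r.2 + m.2)
termination_by a.length
decreasing_by
  · simp only [List.length_take]; omega
  · simp only [List.length_drop]; omega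

def adjacent_layer_crossings_alt (left_layer : List Int) (right_layer : List Int) (children : List (Int × List Int)) : Int :=
  let right_positions : PySem.Dict Int Int :=
    (PySem.List.enumerate right_layer).foldl (fun d p => d.insert p.2 p.1) PySem.Dict.empty
  -- seq: per left node in order, its valid child positions sorted ascending
  let seq : List Int :=
    left_layer.foldl
      (fun acc l =>
        acc ++ PySem.List.sorted
          (((PySem.Dict.mk children).getD l []).filterMap (fun c => right_positions.get? c))
          (fun x => x) false) []
  (pvSortCount seq).2

-- ===== PRECONDITION & SPEC =====
def Spec_adjacent_layer_crossings (left_layer : List Int) (right_layer : List Int) (children : List (Int × List Int)) (out : Int) : Prop := out = adjacent_layer_crossings_alt left_layer right_layer children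
instance (left_layer : List Int) (right_layer : List Int) (children : List (Int × List Int)) (out : Int) : Decidable (Spec_adjacent_layer_crossings left_layer right_layer children out) := by unfold Spec_adjacent_layer_crossings; infer_instance

-- ===== CLAIM (what is proved, stated in full; the proofs are below) =====
def Claim_equal_adjacent_layer_crossings : Prop := ∀ (left_layer : List Int) (right_layer : List Int) (children : List (Int × List Int)), Dom_adjacent_layer_crossings left_layer right_layer children → Spec_adjacent_layer_crossings left_layer right_layer children (adjacent_layer_crossings left_layer right_layer children)

-- ===== LEMMAS AND PROOFS =====

-- number of ordered pairs (i < j) of the list with f l[i] l[j]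
def pvPcount {α : Type} (f : α → α → Bool) : List α → Int
  | [] => 0
  | x :: xs => (xs.countP (f x) : Int) + pvPcount f xs

-- number of pairs (x from xs, y from ys) with f x y
def pvCrossF {α β : Type} (f : α → β → Bool) (xs : List α) (ys : List β) : Int :=
  (xs.map (fun x => ((ys.countP (f x) : Int)))).sum

def pvGt (x y : Int) : Bool := decide (y < x)

theorem pvPairLoopA_eq (l : List (Int × Int)) : pvPairLoopA l = pvPcount pvCondA l := by
  induction l with
  | nil => rfl
  | cons e es ih =>
      simp [pvPairLoopA, pvPcount, ih, PySem.List.foldl_if_add_one]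

theorem pvCrossF_nil_right {α β : Type} (f : α → β → Bool) (xs : List α) :
    pvCrossF f xs [] = 0 := by
  induction xs with
  | nil => rfl
  | cons x xs ih => simp [pvCrossF]

theorem pvCrossF_cons_left {α β : Type} (f : α → β → Bool) (x : α) (xs : List α) (ys : List β) :
    pvCrossF f (x :: xs) ys = (ys.countP (f x) : Int) + pvCrossF f xs ys := by
  simp [pvCrossF]

theorem pvCrossF_cons_right {α β : Type} (f : α → β → Bool) (xs : List α) (y : β) (ys : List β) :
    pvCrossF f xs (y :: ys) = (xs.countP (fun x => f x y) : Int) + pvCrossF f xs ys := by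
  induction xs with
  | nil => simp [pvCrossF]
  | cons x xs ih =>
      simp only [pvCrossF_cons_left, ih, List.countP_cons]
      cases h : f x y
      all_goals simp [h]
      all_goals ring

theorem pvCrossF_perm_left {α β : Type} (f : α → β → Bool) {xs xs' : List α} (ys : List β)
    (h : xs.Perm xs') : pvCrossF f xs ys = pvCrossF f xs' ys := by
  unfold pvCrossF; exact (h.map _).sum_eq

theorem pvCrossF_perm_right {α β : Type} (f : α → β → Bool) (xs : List α) {ys ys' : List β}
    (h : ys.Perm ys') : pvCrossF f xs ys = pvCrossF f xs ys' := by
  simp [pvCrossF, h.countP_eq]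

theorem pvCrossF_congr {α β : Type} {f g : α → β → Bool} {xs : List α} {ys : List β}
    (h : ∀ x ∈ xs, ∀ y ∈ ys, f x y = g x y) : pvCrossF f xs ys = pvCrossF g xs ys := by
  induction xs with
  | nil => rfl
  | cons x xs ih =>
      simp only [pvCrossF_cons_left]
      rw [List.countP_congr (fun y hy => by rw [h x (by simp) y hy]),
        ih (fun x hx y hy => h x (by simp [hx]) y hy)]

theorem pvCrossF_map_left {α α' β : Type} (f : α' → β → Bool) (u : α → α') (xs : List α) (ys : List β) :
    pvCrossF f (xs.map u) ys = pvCrossF (fun a y => f (u a) y) xs ys := by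
  simp [pvCrossF, List.map_map, Function.comp_def]

theorem pvCrossF_map_right {α β β' : Type} (f : α → β' → Bool) (v : β → β') (xs : List α) (ys : List β) :
    pvCrossF f xs (ys.map v) = pvCrossF (fun x b => f x (v b)) xs ys := by
  simp [pvCrossF, List.countP_map, Function.comp_def]

theorem pvPcount_append {α : Type} (f : α → α → Bool) (xs ys : List α) :
    pvPcount f (xs ++ ys) = pvPcount f xs + pvPcount f ys + pvCrossF f xs ys := by
  induction xs with
  | nil => simp [pvPcount, pvCrossF]
  | cons x xs ih =>
      simp only [List.cons_append, pvPcount, ih, List.countP_append, pvCrossF_cons_left]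
      push_cast; ring

theorem pvPcount_eq_zero {α : Type} {f : α → α → Bool} {l : List α}
    (h : ∀ x ∈ l, ∀ y ∈ l, f x y = false) : pvPcount f l = 0 := by
  induction l with
  | nil => rfl
  | cons x xs ih =>
      have h1 : xs.countP (f x) = 0 :=
        List.countP_eq_zero.2 (fun y hy => by simp [h x (by simp) y (by simp [hy])])
      simp [pvPcount, h1, ih (fun a ha b hb => h a (by simp [ha]) b (by simp [hb]))]

theorem pvPcount_sorted_zero {l : List Int} (h : l.Pairwise (· ≤ ·)) :
    pvPcount pvGt l = 0 := by
  induction l with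
  | nil => rfl
  | cons x xs ih =>
      rcases List.pairwise_cons.1 h with ⟨hx, ht⟩
      have h1 : xs.countP (pvGt x) = 0 :=
        List.countP_eq_zero.2 (fun y hy => by simp [pvGt]; exact hx y hy)
      simp [pvPcount, h1, ih ht]

theorem pvPerm_flatMap_congr {α β : Type} {L : List α} {f g : α → List β}
    (h : ∀ a ∈ L, (f a).Perm (g a)) : (L.flatMap f).Perm (L.flatMap g) := by
  induction L with
  | nil => simp
  | cons a L ih =>
      simp only [List.flatMap_cons]
      exact (h a (by simp)).append (ih (fun a ha => h a (by simp [ha])))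

-- merge correctness: sorted merge of two sorted lists, counting cross inversions
theorem pvMergeCount_spec : ∀ (xs ys : List Int), xs.Pairwise (· ≤ ·) → ys.Pairwise (· ≤ ·) →
    (pvMergeCount xs ys).1.Perm (xs ++ ys) ∧ (pvMergeCount xs ys).1.Pairwise (· ≤ ·) ∧
    (pvMergeCount xs ys).2 = pvCrossF pvGt xs ys := by
  intro xs ys
  fun_induction pvMergeCount xs ys with
  | case1 ys => intro _ hy; simp [pvCrossF, hy]
  | case2 x xs => intro hx _; simpa [pvCrossF_nil_right] using hx
  | case3 x xs y ys hxy r ih =>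
      intro hx hy
      rcases List.pairwise_cons.1 hx with ⟨hxall, hxt⟩
      obtain ⟨hp, hs, hc⟩ := ih hxt hy
      refine ⟨by simpa using hp.cons x, ?_, ?_⟩
      · refine List.pairwise_cons.2 ⟨?_, hs⟩
        intro z hz
        have hz' : z ∈ xs ++ (y :: ys) := hp.mem_iff.1 hz
        rcases List.mem_append.1 hz' with h1 | h2
        · exact hxall z h1
        · rcases List.mem_cons.1 h2 with rfl | h3
          · exact hxy
          · exact le_trans hxy ((List.pairwise_cons.1 hy).1 z h3)
      · have h0 : (y :: ys).countP (pvGt x) = 0 := by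
          refine List.countP_eq_zero.2 (fun z hz => ?_)
          rcases List.mem_cons.1 hz with rfl | h3
          · simp [pvGt]; omega
          · have := (List.pairwise_cons.1 hy).1 z h3
            simp [pvGt]; omega
        show (pvMergeCount xs (y :: ys)).2 = pvCrossF pvGt (x :: xs) (y :: ys)
        simp [pvCrossF_cons_left, h0, hc]
  | case4 x xs y ys hxy r ih =>
      intro hx hy
      rcases List.pairwise_cons.1 hy with ⟨hyall, hyt⟩
      obtain ⟨hp, hs, hc⟩ := ih hx hyt
      have hxlt : y < x := by omega
      refine ⟨?_, ?_, ?_⟩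
      · exact (hp.cons y).trans List.perm_middle.symm
      · refine List.pairwise_cons.2 ⟨?_, hs⟩
        intro z hz
        have hz' : z ∈ (x :: xs) ++ ys := hp.mem_iff.1 hz
        rcases List.mem_append.1 hz' with h1 | h2
        · rcases List.mem_cons.1 h1 with rfl | h3
          · omega
          · have := (List.pairwise_cons.1 hx).1 z h3; omega
        · exact hyall z h2
      · have hcnt : (x :: xs).countP (fun x' => pvGt x' y) = (x :: xs).length := by
          refine List.countP_eq_length.2 (fun z hz => ?_)
          rcases List.mem_cons.1 hz with rfl | h3
          · simp [pvGt]; omega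
          · have := (List.pairwise_cons.1 hx).1 z h3
            simp [pvGt]; omega
        show (pvMergeCount (x :: xs) ys).2 + ((x :: xs).length : Int)
            = pvCrossF pvGt (x :: xs) (y :: ys)
        rw [pvCrossF_cons_right, hcnt, hc]; ring

theorem pvPcount_short {α : Type} (f : α → α → Bool) (l : List α) (h : l.length ≤ 1) :
    pvPcount f l = 0 := by
  match l with
  | [] => rfl
  | [x] => simp [pvPcount]
  | x :: y :: t => simp at h

theorem pvSortCount_spec : ∀ a : List Int,
    (pvSortCount a).1.Perm a ∧ (pvSortCount a).1.Pairwise (· ≤ ·) ∧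
    (pvSortCount a).2 = pvPcount pvGt a := by
  intro a
  fun_induction pvSortCount a with
  | case1 a h =>
      refine ⟨List.Perm.refl a, ?_, (pvPcount_short _ _ h).symm⟩
      match a, h with
      | [], _ => simp
      | [x], _ => simp
  | case2 a h mid l r m ihl ihr =>
      obtain ⟨lp, ls, lc⟩ := ihl
      obtain ⟨rp, rs, rc⟩ := ihr
      obtain ⟨mp, ms, mc⟩ := pvMergeCount_spec l.1 r.1 ls rs
      have hsplit : a.take mid ++ a.drop mid = a := List.take_append_drop mid a
      refine ⟨?_, ms, ?_⟩
      · exact mp.trans (by rw [← hsplit]; exact lp.append rp)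
      · have hcross : pvCrossF pvGt l.1 r.1 = pvCrossF pvGt (a.take mid) (a.drop mid) := by
          rw [pvCrossF_perm_left pvGt r.1 lp, pvCrossF_perm_right pvGt _ rp]
        calc l.2 + r.2 + m.2
            = pvPcount pvGt (a.take mid) + pvPcount pvGt (a.drop mid)
              + pvCrossF pvGt (a.take mid) (a.drop mid) := by rw [lc, rc, mc, hcross]
          _ = pvPcount pvGt (a.take mid ++ a.drop mid) := (pvPcount_append _ _ _).symm
          _ = pvPcount pvGt a := by rw [hsplit]

-- A's inner edge loop builds the (left_index, position) pairs of one left node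
theorem pvInnerFold (rp : PySem.Dict Int Int) (i : Int) :
    ∀ (cs : List Int) (acc : List (Int × Int)),
      cs.foldl (fun acc2 rn =>
          match rp.get? rn with
          | some pos => acc2 ++ [(i, pos)]
          | none => acc2) acc
        = acc ++ (cs.filterMap rp.get?).map (fun r => (i, r)) := by
  intro cs
  induction cs with
  | nil => simp
  | cons c cs ih =>
      intro acc
      cases h : rp.get? c with
      | none => simp [List.foldl_cons, h, ih]
      | some pos => simp [List.foldl_cons, h, ih]

-- A's edge list is the flatMap over enumerated left nodes
theorem pvEdgesFold (rp : PySem.Dict Int Int) (children : List (Int × List Int)) :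
    ∀ (L : List (Int × Int)) (acc : List (Int × Int)),
      L.foldl (fun acc p =>
          ((PySem.Dict.mk children).getD p.2 []).foldl
            (fun acc2 rn =>
              match rp.get? rn with
              | some pos => acc2 ++ [(p.1, pos)]
              | none => acc2) acc) acc
        = acc ++ L.flatMap (fun p =>
            (((PySem.Dict.mk children).getD p.2 []).filterMap rp.get?).map (fun r => (p.1, r))) := by
  intro L acc
  simp only [pvInnerFold]
  rw [PySem.List.foldl_append_eq_flatMap]

-- the heart: with strictly increasing left indices, A's pair count over the
-- flattened edge groups equals the inversion count of the per-group-sorted rights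
theorem pvMain (R : Int × Int → List Int) :
    ∀ L : List (Int × Int), L.Pairwise (fun p q => p.1 < q.1) →
      pvPcount pvCondA (L.flatMap (fun p => (R p).map (fun r => (p.1, r))))
        = pvPcount pvGt (L.flatMap (fun p => PySem.List.sorted (R p) (fun x => x) false)) := by
  intro L
  induction L with
  | nil => intro _; rfl
  | cons p L ih =>
      intro hpw
      rcases List.pairwise_cons.1 hpw with ⟨hplt, ht⟩
      simp only [List.flatMap_cons, pvPcount_append]
      have hG0 : pvPcount pvCondA ((R p).map (fun r => (p.1, r))) = 0 := by
        refine pvPcount_eq_zero (fun x hx y hy => ?_)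
        rcases List.mem_map.1 hx with ⟨rx, _, rfl⟩
        rcases List.mem_map.1 hy with ⟨ry, _, rfl⟩
        simp [pvCondA]
      have hS0 : pvPcount pvGt (PySem.List.sorted (R p) (fun x => x) false) = 0 :=
        pvPcount_sorted_zero (PySem.List.sorted_pairwise (R p) (fun x => x))
      have hfst : ∀ y ∈ L.flatMap (fun q => (R q).map (fun r => (q.1, r))), p.1 < y.1 := by
        intro y hy
        rcases List.mem_flatMap.1 hy with ⟨q, hq, hyq⟩
        rcases List.mem_map.1 hyq with ⟨r, _, rfl⟩
        exact hplt q hq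
      have hmap2 : (L.flatMap (fun q => (R q).map (fun r => (q.1, r)))).map (·.2)
          = L.flatMap R := by
        rw [List.map_flatMap]
        refine List.flatMap_congr (fun q _ => ?_)
        simp [List.map_map, Function.comp_def]
      have hcrossL :
          pvCrossF pvCondA ((R p).map (fun r => (p.1, r)))
              (L.flatMap (fun q => (R q).map (fun r => (q.1, r))))
            = pvCrossF pvGt (R p) (L.flatMap R) := by
        rw [pvCrossF_congr (g := fun x y => decide (y.2 < x.2))
            (fun x hx y hy => ?_)]
        · rw [pvCrossF_map_left]
          have := (pvCrossF_map_right (fun (a : Int) (b : Int) => decide (b < a)) (·.2)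
            (R p) (L.flatMap (fun q => (R q).map (fun r => (q.1, r))))).symm
          simp only [this, hmap2]
          rfl
        · rcases List.mem_map.1 hx with ⟨rx, _, rfl⟩
          have h1 := hfst y hy
          simp only [pvCondA]
          simp only at h1
          simp [h1, not_lt_of_gt h1]
      have hpermS : (L.flatMap (fun q => PySem.List.sorted (R q) (fun x => x) false)).Perm
          (L.flatMap R) :=
        pvPerm_flatMap_congr (fun q _ => PySem.List.sorted_perm (R q) (fun x => x) false)
      have hcrossR :
          pvCrossF pvGt (PySem.List.sorted (R p) (fun x => x) false)
              (L.flatMap (fun q => PySem.List.sorted (R q) (fun x => x) false))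
            = pvCrossF pvGt (R p) (L.flatMap R) := by
        rw [pvCrossF_perm_left pvGt _ (PySem.List.sorted_perm (R p) (fun x => x) false),
          pvCrossF_perm_right pvGt _ hpermS]
      rw [hG0, hS0, ih ht, hcrossL, hcrossR]

-- B's seq, rewritten over the enumerated left layer
theorem pvFlatMap_enumerate {β : Type} (l : List Int) (f : Int → List β) :
    l.flatMap f = (PySem.List.enumerate l).flatMap (fun p => f p.2) := by
  conv_lhs => rw [← PySem.List.map_snd_enumerate l 0]
  rw [List.flatMap_map]

-- empty right layer: no edge survives the membership test
theorem pvFilterMap_empty (cs : List Int) :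
    cs.filterMap (fun c => (PySem.Dict.empty : PySem.Dict Int Int).get? c) = [] := by
  induction cs with
  | nil => rfl
  | cons c cs ih => simp [PySem.Dict.get?_empty]

-- ===== VERDICT (by name: the statement is the Claim_ definition above) =====
theorem adjacent_layer_crossings_spec : Claim_equal_adjacent_layer_crossings := by
  intro left_layer right_layer children _
  unfold Spec_adjacent_layer_crossings adjacent_layer_crossings adjacent_layer_crossings_alt
  set rp : PySem.Dict Int Int :=
    (PySem.List.enumerate right_layer).foldl (fun d p => d.insert p.2 p.1) PySem.Dict.empty with hrp
  have hseq : left_layer.foldl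
      (fun acc l => acc ++ PySem.List.sorted
        (((PySem.Dict.mk children).getD l []).filterMap (fun c => rp.get? c)) (fun x => x) false) []
      = left_layer.flatMap (fun l => PySem.List.sorted
        (((PySem.Dict.mk children).getD l []).filterMap (fun c => rp.get? c)) (fun x => x) false) := by
    rw [PySem.List.foldl_append_eq_flatMap]; simp
  by_cases hl : left_layer.isEmpty
  · -- empty left layer: both sides are 0
    have : left_layer = [] := List.isEmpty_iff.1 hl
    subst this
    simp [pvSortCount]
  · by_cases hr : right_layer.isEmpty
    · -- empty right layer: A returns 0 by its guard; B's seq is empty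
      have : right_layer = [] := List.isEmpty_iff.1 hr
      subst this
      have hrp0 : rp = PySem.Dict.empty := by simp [hrp, PySem.List.enumerate]
      simp only [hr, Bool.or_true, if_true]
      rw [hseq, hrp0]
      have : left_layer.flatMap (fun l => PySem.List.sorted
          (((PySem.Dict.mk children).getD l []).filterMap
            (fun c => (PySem.Dict.empty : PySem.Dict Int Int).get? c)) (fun x => x) false) = [] := by
        refine List.flatMap_eq_nil_iff.2 (fun l _ => ?_)
        rw [pvFilterMap_empty]
        rfl
      rw [this]
      simp [pvSortCount]
    · -- main case
      have hl' : left_layer.isEmpty = false := by simpa using hl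
      have hr' : right_layer.isEmpty = false := by simpa using hr
      simp only [hl', hr', Bool.or_self, Bool.false_eq_true, if_false, hseq]
      rw [pvPairLoopA_eq, pvEdgesFold rp children (PySem.List.enumerate left_layer) [],
        List.nil_append,
        pvFlatMap_enumerate left_layer (fun l => PySem.List.sorted
          (((PySem.Dict.mk children).getD l []).filterMap (fun c => rp.get? c)) (fun x => x) false),
        (pvSortCount_spec _).2.2]
      exact pvMain (fun p => ((PySem.Dict.mk children).getD p.2 []).filterMap rp.get?)
        (PySem.List.enumerate left_layer) (PySem.List.pairwise_lt_enumerate left_layer 0)
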